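-- pv_equiv track=rewrite | github.com/JaneChun/algorithm | HackerRank/play-game.py | bricksGame
-- ===== SOURCE A (Python) =====
-- def bricksGame(arr):
--     total = [0] * (len(arr) + 1)
--
--     for i in range(len(arr) - 1, -1, -1):
--         total[i] = arr[i] + total[i + 1]
--
--     dp = [0] * (len(arr) + 1 + 2)
--     # dp[i] = maximum score I can get from arr[i:]
--
--     # suppose my friend always took best for her
--     for i in range(len(arr) - 1, -1, -1):
--
--         dp[i] = total[i] - min(dp[i + 1], dp[i + 2], dp[i + 3])
--
--     return dp[0]
-- ===== SOURCE B (Python) =====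
-- def bricksGame(arr):
--     # Pair-state DP: for each suffix track (score of player to move, score of the other),
--     # enumerating the 1-3 brick moves explicitly; no suffix-sum table needed.
--     n = len(arr)
--     me = [0] * (n + 1)
--     opp = [0] * (n + 1)
--     for i in range(n - 1, -1, -1):
--         taken = arr[i]
--         best_me = taken + opp[i + 1]
--         best_opp = me[i + 1]
--         for k in (2, 3):
--             if i + k > n:
--                 break
--             taken += arr[i + k - 1]
--             cand = taken + opp[i + k]
--             if cand > best_me:
--                 best_me = cand
--                 best_opp = me[i + k]
--         me[i] = best_me
--         opp[i] = best_opp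
--     return me[0]
-- ===== Notes on version B (the rewrite author's own statement) =====
-- stated objective: alternative
-- what changed: Replaced the suffix-sum table plus closed-form line dp[i] = total[i] - min(dp[i+1],dp[i+2],dp[i+3]) by a pair-state DP that keeps (score of the player to move, score of the other player) per suffix and explicitly enumerates the 1-3 brick moves with a running taken sum; no suffix-sum table or min-complement trick is used.
import Mathlib
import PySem

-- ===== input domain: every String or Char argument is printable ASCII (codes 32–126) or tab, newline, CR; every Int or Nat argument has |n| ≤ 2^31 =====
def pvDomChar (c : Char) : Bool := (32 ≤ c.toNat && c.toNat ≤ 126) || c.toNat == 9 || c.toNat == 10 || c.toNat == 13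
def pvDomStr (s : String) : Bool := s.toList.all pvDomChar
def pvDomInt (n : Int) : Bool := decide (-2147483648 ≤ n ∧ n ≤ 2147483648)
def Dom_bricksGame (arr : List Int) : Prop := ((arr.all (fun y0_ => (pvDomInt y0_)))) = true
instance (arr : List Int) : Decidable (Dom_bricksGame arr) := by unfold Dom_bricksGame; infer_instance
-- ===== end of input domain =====

-- B replaces A's suffix-sum table + min-complement closed form by a pair-state DP
-- (score of the player to move, score of the other) with an explicit 1–3 brick move
-- enumeration; same O(n) cost, different decomposition.

-- ===== PORT A =====
-- 'for i in range(len(arr)-1, -1, -1): total[i] = arr[i] + total[i+1]'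
-- ported as structural recursion on the loop counter (i runs n-1 .. 0).
-- All list indices below are in range on every call, so plain getD/set are exact here.
def aLoopTotal (arr : List Int) : Nat → List Int → List Int
  | 0, t => t
  | i + 1, t => aLoopTotal arr i (t.set i (arr.getD i 0 + t.getD (i + 1) 0))

-- 'for i in range(len(arr)-1, -1, -1): dp[i] = total[i] - min(dp[i+1], dp[i+2], dp[i+3])'
def aLoopDp (total : List Int) : Nat → List Int → List Int
  | 0, d => d
  | i + 1, d =>
      aLoopDp total i
        (d.set i (total.getD i 0 -
          min (min (d.getD (i + 1) 0) (d.getD (i + 2) 0)) (d.getD (i + 3) 0)))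

def bricksGame (arr : List Int) : Int :=
  (aLoopDp (aLoopTotal arr arr.length (List.replicate (arr.length + 1) 0))
      arr.length (List.replicate (arr.length + 3) 0)).getD 0 0

-- ===== PORT B =====
-- inner 'for k in (2, 3): if i+k > n: break; …' of Source B; state (taken, best_me, best_opp).
def bInner (arr opp me : List Int) (n i : Nat) :
    List Nat → Int → Int → Int → Int × Int
  | [], _, bestMe, bestOpp => (bestMe, bestOpp)
  | k :: ks, taken, bestMe, bestOpp =>
      if n < i + k then (bestMe, bestOpp)        -- break
      else
        let taken' := taken + arr.getD (i + k - 1) 0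
        let cand := taken' + opp.getD (i + k) 0
        if bestMe < cand then
          bInner arr opp me n i ks taken' cand (me.getD (i + k) 0)
        else
          bInner arr opp me n i ks taken' bestMe bestOpp

-- outer 'for i in range(n-1, -1, -1)' of Source B
def bLoop (arr : List Int) (n : Nat) : Nat → List Int → List Int → List Int × List Int
  | 0, me, opp => (me, opp)
  | i + 1, me, opp =>
      let r := bInner arr opp me n i [2, 3] (arr.getD i 0)
                 (arr.getD i 0 + opp.getD (i + 1) 0) (me.getD (i + 1) 0)
      bLoop arr n i (me.set i r.1) (opp.set i r.2)

def bricksGame_alt (arr : List Int) : Int :=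
  (bLoop arr arr.length arr.length (List.replicate (arr.length + 1) 0)
      (List.replicate (arr.length + 1) 0)).1.getD 0 0

-- ===== PRECONDITION & SPEC =====
def Spec_bricksGame (arr : List Int) (out : Int) : Prop := out = bricksGame_alt arr
instance (arr : List Int) (out : Int) : Decidable (Spec_bricksGame arr out) := by unfold Spec_bricksGame; infer_instance

-- ===== CLAIM (what is proved, stated in full; the proofs are below) =====
def Claim_equal_bricksGame : Prop := ∀ (arr : List Int), Dom_bricksGame arr → Spec_bricksGame arr (bricksGame arr)

-- ===== LEMMAS AND PROOFS =====

-- sum of the suffix arr[j:]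
def sfx (arr : List Int) (j : Nat) : Int := (arr.drop j).sum

-- the game value of the suffix arr[j:] (A's dp[j])
def dpF (arr : List Int) (j : Nat) : Int :=
  if j < arr.length then
    sfx arr j - min (min (dpF arr (j + 1)) (dpF arr (j + 2))) (dpF arr (j + 3))
  else 0
termination_by arr.length - j

lemma dpF_ge (arr : List Int) (j : Nat) (h : arr.length ≤ j) : dpF arr j = 0 := by
  rw [dpF, if_neg (by omega)]

lemma dpF_lt (arr : List Int) (j : Nat) (h : j < arr.length) :
    dpF arr j = sfx arr j - min (min (dpF arr (j + 1)) (dpF arr (j + 2))) (dpF arr (j + 3)) := by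
  rw [dpF, if_pos h]

lemma sfx_succ (arr : List Int) (j : Nat) (h : j < arr.length) :
    sfx arr j = arr.getD j 0 + sfx arr (j + 1) := by
  unfold sfx
  rw [List.drop_eq_getElem_cons h, List.sum_cons, List.getD_eq_getElem _ _ h]

lemma sfx_ge (arr : List Int) (j : Nat) (h : arr.length ≤ j) : sfx arr j = 0 := by
  unfold sfx
  rw [List.drop_eq_nil_of_le h]; rfl

lemma getD_replicate_zero (m j : Nat) : (List.replicate m (0 : Int)).getD j 0 = 0 := by
  rcases lt_or_ge j m with h | h
  · rw [List.getD_eq_getElem _ _ (by simpa using h), List.getElem_replicate]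
  · rw [List.getD_eq_default _ _ (by simpa using h)]

lemma getD_set_self (l : List Int) (i : Nat) (v : Int) (h : i < l.length) :
    (l.set i v).getD i 0 = v := by
  rw [List.getD_eq_getElem _ _ (by simpa using h), List.getElem_set_self]

lemma getD_set_ne (l : List Int) (i j : Nat) (v : Int) (h : i ≠ j) :
    (l.set i v).getD j 0 = l.getD j 0 := by
  rw [List.getD_eq_getElem?_getD, List.getD_eq_getElem?_getD, List.getElem?_set_ne h]

-- A's total loop builds the suffix sums
lemma aLoopTotal_getD (arr : List Int) :
    ∀ (i : Nat) (t : List Int), t.length = arr.length + 1 → i ≤ arr.length →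
      (∀ j, i ≤ j → t.getD j 0 = sfx arr j) →
      ∀ j, (aLoopTotal arr i t).getD j 0 = sfx arr j := by
  intro i
  induction i with
  | zero => intro t _ _ h j; exact h j (Nat.zero_le j)
  | succ i ih =>
      intro t hl hle h j
      simp only [aLoopTotal]
      apply ih _ (by simpa using hl) (by omega)
      intro j hj
      by_cases hji : j = i
      · subst hji
        rw [getD_set_self _ _ _ (by omega), h (j + 1) (by omega),
          sfx_succ arr j (by omega)]
      · rw [getD_set_ne _ _ _ _ (by omega)]
        exact h j (by omega)

-- A's dp loop builds dpF
lemma aLoopDp_getD (arr total : List Int) (htot : ∀ j, total.getD j 0 = sfx arr j) :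
    ∀ (i : Nat) (d : List Int), d.length = arr.length + 3 → i ≤ arr.length →
      (∀ j, i ≤ j → d.getD j 0 = dpF arr j) →
      ∀ j, (aLoopDp total i d).getD j 0 = dpF arr j := by
  intro i
  induction i with
  | zero => intro d _ _ h j; exact h j (Nat.zero_le j)
  | succ i ih =>
      intro d hl hle h j
      simp only [aLoopDp]
      apply ih _ (by simpa using hl) (by omega)
      intro j hj
      by_cases hji : j = i
      · subst hji
        rw [getD_set_self _ _ _ (by omega), htot j, h (j + 1) (by omega),
          h (j + 2) (by omega), h (j + 3) (by omega), dpF_lt arr j (by omega)]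
      · rw [getD_set_ne _ _ _ _ (by omega)]
        exact h j (by omega)

lemma bricksGame_eq_dpF (arr : List Int) : bricksGame arr = dpF arr 0 := by
  unfold bricksGame
  apply aLoopDp_getD
  · apply aLoopTotal_getD
    · simp
    · exact le_refl _
    · intro j hj
      rw [getD_replicate_zero, sfx_ge arr j hj]
  · simp
  · exact le_refl _
  · intro j hj
    rw [getD_replicate_zero, dpF_ge arr j hj]

-- B's move enumeration at position i computes (dpF i, sfx i - dpF i)
lemma bStep (arr me opp : List Int) (i : Nat) (hi : i < arr.length)
    (hme : ∀ j, i + 1 ≤ j → me.getD j 0 = dpF arr j)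
    (hopp : ∀ j, i + 1 ≤ j → opp.getD j 0 = sfx arr j - dpF arr j) :
    bInner arr opp me arr.length i [2, 3] (arr.getD i 0)
        (arr.getD i 0 + opp.getD (i + 1) 0) (me.getD (i + 1) 0)
      = (dpF arr i, sfx arr i - dpF arr i) := by
  have hs1 : sfx arr i = arr.getD i 0 + sfx arr (i + 1) := sfx_succ arr i hi
  have hdp : dpF arr i
      = sfx arr i - min (min (dpF arr (i + 1)) (dpF arr (i + 2))) (dpF arr (i + 3)) :=
    dpF_lt arr i hi
  rw [hme (i + 1) (le_refl _), hopp (i + 1) (le_refl _)]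
  by_cases h2 : arr.length < i + 2
  · -- only one brick can be taken
    have hd1 : dpF arr (i + 1) = 0 := dpF_ge arr _ (by omega)
    have hd2 : dpF arr (i + 2) = 0 := dpF_ge arr _ (by omega)
    have hd3 : dpF arr (i + 3) = 0 := dpF_ge arr _ (by omega)
    simp only [bInner, if_pos h2]
    rw [Prod.mk.injEq]
    constructor <;> omega
  · have hs2 : sfx arr (i + 1) = arr.getD (i + 1) 0 + sfx arr (i + 2) :=
      sfx_succ arr (i + 1) (by omega)
    by_cases h3 : arr.length < i + 3
    · -- two bricks possible
      have hd2 : dpF arr (i + 2) = 0 := dpF_ge arr _ (by omega)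
      have hd3 : dpF arr (i + 3) = 0 := dpF_ge arr _ (by omega)
      simp only [bInner, if_neg h2, if_pos h3, show i + 2 - 1 = i + 1 from rfl]
      rw [hme (i + 2) (by omega), hopp (i + 2) (by omega)]
      split_ifs <;> rw [Prod.mk.injEq] <;> constructor <;> omega
    · -- three bricks possible
      have hs3 : sfx arr (i + 2) = arr.getD (i + 2) 0 + sfx arr (i + 3) :=
        sfx_succ arr (i + 2) (by omega)
      simp only [bInner, if_neg h2, if_neg h3, show i + 2 - 1 = i + 1 from rfl,
        show i + 3 - 1 = i + 2 from rfl]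
      rw [hme (i + 2) (by omega), hopp (i + 2) (by omega),
        hme (i + 3) (by omega), hopp (i + 3) (by omega)]
      split_ifs <;> rw [Prod.mk.injEq] <;> constructor <;> omega

-- B's outer loop maintains me = dpF, opp = sfx - dpF
lemma bLoop_getD (arr : List Int) :
    ∀ (i : Nat) (me opp : List Int),
      me.length = arr.length + 1 → opp.length = arr.length + 1 → i ≤ arr.length →
      (∀ j, i ≤ j → me.getD j 0 = dpF arr j) →
      (∀ j, i ≤ j → opp.getD j 0 = sfx arr j - dpF arr j) →
      ∀ j, (bLoop arr arr.length i me opp).1.getD j 0 = dpF arr j ∧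
           (bLoop arr arr.length i me opp).2.getD j 0 = sfx arr j - dpF arr j := by
  intro i
  induction i with
  | zero =>
      intro me opp _ _ _ hme hopp j
      exact ⟨hme j (Nat.zero_le j), hopp j (Nat.zero_le j)⟩
  | succ i ih =>
      intro me opp hlm hlo hle hme hopp j
      simp only [bLoop]
      rw [bStep arr me opp i (by omega) (fun j hj => hme j hj) (fun j hj => hopp j hj)]
      apply ih _ _ (by simpa using hlm) (by simpa using hlo) (by omega)
      · intro j hj
        by_cases hji : j = i
        · subst hji; exact getD_set_self _ _ _ (by omega)
        · rw [getD_set_ne _ _ _ _ (by omega)]; exact hme j (by omega)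
      · intro j hj
        by_cases hji : j = i
        · subst hji; exact getD_set_self _ _ _ (by omega)
        · rw [getD_set_ne _ _ _ _ (by omega)]; exact hopp j (by omega)

lemma bricksGame_alt_eq_dpF (arr : List Int) : bricksGame_alt arr = dpF arr 0 := by
  unfold bricksGame_alt
  exact (bLoop_getD arr arr.length _ _ (by simp) (by simp) (le_refl _)
    (fun j hj => by rw [getD_replicate_zero, dpF_ge arr j hj])
    (fun j hj => by rw [getD_replicate_zero, dpF_ge arr j hj, sfx_ge arr j hj]; ring) 0).1

-- ===== VERDICT (by name: the statement is the Claim_ definition above) =====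
theorem bricksGame_spec : Claim_equal_bricksGame := by
  intro arr _
  unfold Spec_bricksGame
  rw [bricksGame_eq_dpF, bricksGame_alt_eq_dpF]
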